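-- pv_equiv track=rewrite | github.com/daydream2002/rlcode | mah_tool/feature_extract_v10.py | gangJudge
-- ===== SOURCE A (Python) =====
-- def gangJudge(actions):
--     """
--     杠子判断
--     @param actions: 副露
--     @return: 杠子特征矩阵
--     """
--     feature = [0, 0, 0, 0, 0, 0, 0, 0, 0, 0, 0, 0, 0, 0, 0, 0, 0, 0, 0, 0, 0, 0, 0, 0, 0, 0, 0, 0, 0, 0, 0, 0, 0, 0]
--     wan = []
--     tiao = []
--     tong = []
--     zi = []
--
--     # wan
--     for i in range(len(actions)):
--         if len(actions[i]) == 4: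
--             if actions[i][0] == actions[i][1] and actions[i][0] < 10:
--                 wan.append(actions[i])
--
--     for j in range(len(wan)):
--         feature[wan[j][0] - 1] += 1
--
--     # tiao
--     for i in range(len(actions)):
--         if len(actions[i]) == 4:
--             if actions[i][0] == actions[i][1] and 16 < actions[i][0] < 26:
--                 tiao.append(actions[i])
--
--     for j in range(len(tiao)):
--         feature[tiao[j][0] - 8] += 1
--
--     # tong
--     for i in range(len(actions)):
--         if len(actions[i]) == 4:
--             if actions[i][0] == actions[i][1] and 32 < actions[i][0] < 49:
--                 tong.append(actions[i])
--
--     for j in range(len(tong)):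
--         feature[tong[j][0] - 15] += 1
--
--     # zi
--     for i in range(len(actions)):
--         if len(actions[i]) == 4:
--             if actions[i][0] == actions[i][1] and actions[i][0] > 48:
--                 zi.append(actions[i])
--
--     for j in range(len(zi)):
--         feature[zi[j][0] - 22] += 1
--
--     return feature
-- ===== SOURCE B (Python) =====
-- def gangJudge(actions):
--     """
--     杠子判断 — single classify-and-apply pass (no intermediate wan/tiao/tong/zi lists).
--     @param actions: 副露
--     @return: 杠子特征矩阵
--     """
--     feature = [0] * 34
--     for a in actions:
--         if len(a) == 4 and a[0] == a[1]:
--             x = a[0]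
--             if x < 10:
--                 feature[x - 1] += 1
--             elif 16 < x < 26:
--                 feature[x - 8] += 1
--             elif 32 < x < 49:
--                 feature[x - 15] += 1
--             elif x > 48:
--                 feature[x - 22] += 1
--     return feature
-- ===== Notes on version B (the rewrite author's own statement) =====
-- stated objective: simpler
-- what changed: Replaced A's eight loops (four collect passes building wan/tiao/tong/zi lists plus four apply passes) with a single classify-and-increment pass over actions and no intermediate lists.
-- outside the precondition, e.g. on gangJudge([[-40, -40, 1, 2]]): A raises IndexError, B raises IndexError; on gangJudge([[60, 60, 1, 2]]): A raises IndexError, B raises IndexError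
import Mathlib
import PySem

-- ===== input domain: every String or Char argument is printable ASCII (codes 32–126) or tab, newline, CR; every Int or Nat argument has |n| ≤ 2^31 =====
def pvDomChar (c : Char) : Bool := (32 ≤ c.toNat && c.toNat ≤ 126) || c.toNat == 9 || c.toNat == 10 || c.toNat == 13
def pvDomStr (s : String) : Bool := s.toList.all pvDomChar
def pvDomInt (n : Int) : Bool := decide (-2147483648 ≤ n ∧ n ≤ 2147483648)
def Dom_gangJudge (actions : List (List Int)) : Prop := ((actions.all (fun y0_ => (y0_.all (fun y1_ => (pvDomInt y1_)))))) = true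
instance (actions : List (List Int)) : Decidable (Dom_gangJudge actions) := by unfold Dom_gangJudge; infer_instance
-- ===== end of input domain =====

-- B replaces A's eight loops (four collect passes into wan/tiao/tong/zi lists, four apply
-- passes) by one classify-and-increment pass over actions: simpler, same values.

-- a[n] for n ≥ 0; exact here since every use is guarded by len(a) == 4 > n
def pyAt (a : List Int) (n : Nat) : Int := a.getD n 0

-- feature[i] += 1 with Python index semantics (negative i counts from the end);
-- exact for in-range i; where Python raises IndexError (excluded by Pre_) it is a no-op
def pyInc (f : List Int) (i : Int) : List Int :=
  let j : Int := if i < 0 then i + f.length else i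
  if 0 ≤ j ∧ j < (f.length : Int) then f.modify j.toNat (· + 1) else f

-- ===== PORT A =====
def gangJudge (actions : List (List Int)) : List Int :=
  let feature : List Int := [0, 0, 0, 0, 0, 0, 0, 0, 0, 0, 0, 0, 0, 0, 0, 0, 0,
                             0, 0, 0, 0, 0, 0, 0, 0, 0, 0, 0, 0, 0, 0, 0, 0, 0]
  -- wan
  let wan := actions.foldl (fun acc a =>
    if a.length = 4 then
      (if pyAt a 0 = pyAt a 1 ∧ pyAt a 0 < 10 then acc ++ [a] else acc)
    else acc) []
  let feature := wan.foldl (fun f w => pyInc f (pyAt w 0 - 1)) feature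
  -- tiao
  let tiao := actions.foldl (fun acc a =>
    if a.length = 4 then
      (if pyAt a 0 = pyAt a 1 ∧ 16 < pyAt a 0 ∧ pyAt a 0 < 26 then acc ++ [a] else acc)
    else acc) []
  let feature := tiao.foldl (fun f w => pyInc f (pyAt w 0 - 8)) feature
  -- tong
  let tong := actions.foldl (fun acc a =>
    if a.length = 4 then
      (if pyAt a 0 = pyAt a 1 ∧ 32 < pyAt a 0 ∧ pyAt a 0 < 49 then acc ++ [a] else acc)
    else acc) []
  let feature := tong.foldl (fun f w => pyInc f (pyAt w 0 - 15)) feature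
  -- zi
  let zi := actions.foldl (fun acc a =>
    if a.length = 4 then
      (if pyAt a 0 = pyAt a 1 ∧ 48 < pyAt a 0 then acc ++ [a] else acc)
    else acc) []
  let feature := zi.foldl (fun f w => pyInc f (pyAt w 0 - 22)) feature
  feature

-- ===== PORT B =====
def gangJudge_alt (actions : List (List Int)) : List Int :=
  actions.foldl (fun f a =>
    if a.length = 4 ∧ pyAt a 0 = pyAt a 1 then
      let x := pyAt a 0
      if x < 10 then pyInc f (x - 1)
      else if 16 < x ∧ x < 26 then pyInc f (x - 8)
      else if 32 < x ∧ x < 49 then pyInc f (x - 15)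
      else if 48 < x then pyInc f (x - 22)
      else f
    else f) (List.replicate 34 0)

-- ===== PRECONDITION & SPEC =====
-- Pre_ excludes exactly the inputs on which Python A raises IndexError: a kong entry
-- (len 4, first two equal) whose first tile x gives an index outside the 34-slot
-- feature list (x ≤ -34 in the wan branch, or x ≥ 56 in the zi branch).
def Pre_gangJudge (actions : List (List Int)) : Prop :=
  ∀ a ∈ actions, a.length = 4 → pyAt a 0 = pyAt a 1 →
    (pyAt a 0 < 10 → -33 ≤ pyAt a 0) ∧ (48 < pyAt a 0 → pyAt a 0 ≤ 55)
instance (actions : List (List Int)) : Decidable (Pre_gangJudge actions) := by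
  unfold Pre_gangJudge; infer_instance
def pvWitness_gangJudge : List (List Int) := [[1, 1, 1, 1], [50, 50, 50, 50], [17, 2, 3]]

def Spec_gangJudge (actions : List (List Int)) (out : List Int) : Prop := out = gangJudge_alt actions
instance (actions : List (List Int)) (out : List Int) : Decidable (Spec_gangJudge actions out) := by unfold Spec_gangJudge; infer_instance

-- ===== CLAIM (what is proved, stated in full; the proofs are below) =====
def Claim_equal_gangJudge : Prop := ∀ (actions : List (List Int)), Dom_gangJudge actions → Pre_gangJudge actions → Spec_gangJudge actions (gangJudge actions)

-- ===== LEMMAS AND PROOFS =====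

theorem modify_add_comm (l : List Int) (m n : Nat) :
    (l.modify m (· + 1)).modify n (· + 1) = (l.modify n (· + 1)).modify m (· + 1) := by
  induction l generalizing m n with
  | nil => simp
  | cons a l ih =>
    cases m with
    | zero => cases n with
      | zero => rfl
      | succ n => simp [List.modify_cons]
    | succ m => cases n with
      | zero => simp [List.modify_cons]
      | succ n => simp [ih]

-- proof-side view of pyInc with the index already resolved
def incAt (l : List Int) (j : Int) : List Int :=
  if 0 ≤ j ∧ j < (l.length : Int) then l.modify j.toNat (· + 1) else l

theorem pyInc_eq_incAt (f : List Int) (i : Int) :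
    pyInc f i = incAt f (if i < 0 then i + f.length else i) := rfl

theorem length_incAt (l : List Int) (j : Int) : (incAt l j).length = l.length := by
  unfold incAt; split <;> simp

theorem incAt_comm (l : List Int) (i j : Int) :
    incAt (incAt l i) j = incAt (incAt l j) i := by
  by_cases hi : 0 ≤ i ∧ i < (l.length : Int) <;>
    by_cases hj : 0 ≤ j ∧ j < (l.length : Int) <;>
    · simp [incAt, hi, hj, List.length_modify]
      first | rfl | exact modify_add_comm l _ _ | skip

theorem pyInc_comm (f : List Int) (i j : Int) :
    pyInc (pyInc f i) j = pyInc (pyInc f j) i := by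
  simp only [pyInc_eq_incAt, length_incAt]
  exact incAt_comm f _ _

-- pulling one step through a foldl of cross-commuting steps
theorem foldl_comm_single {σ α : Type} (f g : σ → α → σ)
    (h : ∀ s a b, g (f s a) b = f (g s b) a)
    (l : List α) (s : σ) (b : α) :
    g (List.foldl f s l) b = List.foldl f (g s b) l := by
  induction l generalizing s with
  | nil => rfl
  | cons a l ih => simp only [List.foldl_cons, ih, h]

-- two sequential passes with cross-commuting steps fuse into one pass
theorem foldl_foldl_merge {σ α : Type} (f g : σ → α → σ)
    (h : ∀ s a b, g (f s a) b = f (g s b) a)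
    (l : List α) (s : σ) :
    List.foldl g (List.foldl f s l) l = List.foldl (fun s a => g (f s a) a) s l := by
  induction l generalizing s with
  | nil => rfl
  | cons a l ih =>
    simp only [List.foldl_cons]
    rw [foldl_comm_single f g h]
    exact ih _

-- collect-then-apply equals one conditional-apply pass
theorem foldl_collect_apply {σ α : Type} (p : α → Prop) [DecidablePred p] (h : σ → α → σ)
    (l : List α) (acc : List α) (s : σ) :
    List.foldl h s (List.foldl (fun ac a => if p a then ac ++ [a] else ac) acc l)
      = List.foldl (fun s a => if p a then h s a else s) (List.foldl h s acc) l := by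
  induction l generalizing acc with
  | nil => rfl
  | cons a l ih =>
    simp only [List.foldl_cons]
    by_cases hp : p a
    · simp only [hp, if_pos, ih, List.foldl_append, List.foldl_cons, List.foldl_nil]
    · simp only [hp, ih, if_false]

-- one conditional-increment pass
def condStep (c : List Int → Prop) [DecidablePred c] (g : List Int → Int) :
    List Int → List Int → List Int :=
  fun s a => if c a then pyInc s (g a) else s

-- A's collect phase for condition p followed by its apply phase, as one conditional pass
theorem phase_eq {p : List Int → Prop} [DecidablePred p] (g : List Int → Int)
    (actions : List (List Int)) (s : List Int) :
    List.foldl (fun f w => pyInc f (g w)) s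
      (actions.foldl (fun ac a => if p a then ac ++ [a] else ac) [])
      = List.foldl (condStep p g) s actions := by
  simpa [condStep] using foldl_collect_apply p (fun f w => pyInc f (g w)) actions [] s

-- cross-commutation of per-element steps
def Cross (f g : List Int → List Int → List Int) : Prop :=
  ∀ s a b, g (f s a) b = f (g s b) a

theorem cross_condStep (c1 c2 : List Int → Prop) [DecidablePred c1] [DecidablePred c2]
    (g1 g2 : List Int → Int) : Cross (condStep c1 g1) (condStep c2 g2) := by
  intro s a b
  unfold condStep
  split_ifs <;> first | rfl | exact pyInc_comm s _ _

theorem cross_symm {f g : List Int → List Int → List Int} (h : Cross f g) : Cross g f :=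
  fun s a b => (h s b a).symm

theorem cross_comp {f1 f2 g : List Int → List Int → List Int}
    (h1 : Cross f1 g) (h2 : Cross f2 g) : Cross (fun s a => f2 (f1 s a) a) g := by
  intro s a b
  dsimp only
  rw [h2, h1]

theorem nested_if_eq {α : Type} (p q : Prop) [Decidable p] [Decidable q] (s t : α) :
    (if p then (if q then s else t) else t) = if p ∧ q then s else t := by
  split_ifs <;> tauto

-- ===== VERDICT (by name: the statement is the Claim_ definition above) =====
theorem gangJudge_spec : Claim_equal_gangJudge := by
  intro actions _ _
  unfold Spec_gangJudge gangJudge gangJudge_alt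
  dsimp only
  -- normalise A's nested ifs in the collect steps
  simp only [nested_if_eq]
  -- initial feature literal = replicate 34 0
  have hfeat : ([0, 0, 0, 0, 0, 0, 0, 0, 0, 0, 0, 0, 0, 0, 0, 0, 0,
                 0, 0, 0, 0, 0, 0, 0, 0, 0, 0, 0, 0, 0, 0, 0, 0, 0] : List Int)
      = List.replicate 34 0 := by decide
  rw [hfeat]
  -- each collect+apply phase is one conditional pass
  rw [phase_eq (p := fun a => a.length = 4 ∧ pyAt a 0 = pyAt a 1 ∧ pyAt a 0 < 10)
        (fun w => pyAt w 0 - 1)]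
  rw [phase_eq (p := fun a => a.length = 4 ∧ pyAt a 0 = pyAt a 1 ∧ 16 < pyAt a 0 ∧ pyAt a 0 < 26)
        (fun w => pyAt w 0 - 8)]
  rw [phase_eq (p := fun a => a.length = 4 ∧ pyAt a 0 = pyAt a 1 ∧ 32 < pyAt a 0 ∧ pyAt a 0 < 49)
        (fun w => pyAt w 0 - 15)]
  rw [phase_eq (p := fun a => a.length = 4 ∧ pyAt a 0 = pyAt a 1 ∧ 48 < pyAt a 0)
        (fun w => pyAt w 0 - 22)]
  -- fuse the four passes into one
  rw [foldl_foldl_merge _ _ (cross_condStep _ _ _ _)]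
  rw [foldl_foldl_merge _ _
    (cross_symm (cross_comp (cross_condStep _ _ _ _) (cross_condStep _ _ _ _)))]
  rw [foldl_foldl_merge _ _
    (cross_symm (cross_comp (cross_condStep _ _ _ _)
      (cross_comp (cross_condStep _ _ _ _) (cross_condStep _ _ _ _))))]
  -- the fused step is B's classify-and-increment step
  congr 1
  funext s a
  simp only [condStep]
  by_cases h4 : a.length = 4 ∧ pyAt a 0 = pyAt a 1
  · obtain ⟨hl, he⟩ := h4
    simp only [hl, he, true_and, and_true]
    split_ifs <;> first | rfl | omega
  · rw [if_neg h4]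
    have h1 : ¬(a.length = 4 ∧ pyAt a 0 = pyAt a 1 ∧ pyAt a 0 < 10) := by tauto
    have h2 : ¬(a.length = 4 ∧ pyAt a 0 = pyAt a 1 ∧ 16 < pyAt a 0 ∧ pyAt a 0 < 26) := by tauto
    have h3 : ¬(a.length = 4 ∧ pyAt a 0 = pyAt a 1 ∧ 32 < pyAt a 0 ∧ pyAt a 0 < 49) := by tauto
    have h5 : ¬(a.length = 4 ∧ pyAt a 0 = pyAt a 1 ∧ 48 < pyAt a 0) := by tauto
    rw [if_neg h1, if_neg h2, if_neg h3, if_neg h5]
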